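-- pv_equiv track=rewrite | github.com/jbr1tr/Algorithm | 프로그래머스/0/181894. 2의 영역/2의 영역.py | solution
-- ===== SOURCE A (Python) =====
-- def solution(arr):
--     answer = []
--     temp = []
--     for i in range(len(arr)):
--         if arr[i] == 2:
--             temp.append(i)
--     if len(temp) >= 2:
--         answer = arr[temp[0]:temp[-1] + 1]
--     elif len(temp) == 1:
--         answer = [2]
--     else:
--         answer = [-1]
--     return answer
-- ===== SOURCE B (Python) =====
-- def solution(arr):
--     if 2 not in arr:
--         return [-1]
--     first = arr.index(2)
--     last = len(arr) - 1 - arr[::-1].index(2)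
--     return arr[first:last + 1]
-- ===== Notes on version B (the rewrite author's own statement) =====
-- stated objective: simpler
-- what changed: B drops the loop that collects every index of 2 into a list and the three-way branch on its length; it tests membership once, takes first = arr.index(2) and last = len(arr)-1-arr[::-1].index(2), and returns the single slice arr[first:last+1] (the single-occurrence case folds into the slice).
import Mathlib
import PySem

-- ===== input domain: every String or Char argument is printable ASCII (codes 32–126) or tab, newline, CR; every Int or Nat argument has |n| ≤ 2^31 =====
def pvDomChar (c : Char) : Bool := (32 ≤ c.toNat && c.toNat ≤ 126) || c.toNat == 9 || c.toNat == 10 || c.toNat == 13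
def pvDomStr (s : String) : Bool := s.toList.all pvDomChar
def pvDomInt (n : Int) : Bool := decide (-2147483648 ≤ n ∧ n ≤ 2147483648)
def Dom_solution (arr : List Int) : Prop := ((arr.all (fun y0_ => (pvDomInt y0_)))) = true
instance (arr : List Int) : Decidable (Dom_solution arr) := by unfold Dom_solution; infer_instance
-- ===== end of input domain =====

-- B replaces A's index-collecting loop and three-way branch by a membership test,
-- first/last index lookups and a single slice; same O(n) cost, simpler decomposition.

-- ===== PORT A =====
def solution (arr : List Int) : List Int :=
  let temp : List Int :=
    (PySem.List.pyRange 0 (arr.length : Int) 1).foldl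
      (fun t i => if PySem.List.pyGetD arr i 0 = 2 then t ++ [i] else t) []
  if 2 ≤ temp.length then
    PySem.List.slice arr (some (PySem.List.pyGetD temp 0 0)) (some (PySem.List.pyGetD temp (-1) 0 + 1))
  else if temp.length = 1 then [2]
  else [-1]

-- ===== PORT B =====
def solution_alt (arr : List Int) : List Int :=
  if (2 : Int) ∉ arr then [-1]
  else
    let first : Nat := (PySem.List.index? arr 2).getD 0
    -- arr[::-1] is arr.reverse (PySem.List.slice?_none_none_neg_one)
    let last : Int := (arr.length : Int) - 1 - ((PySem.List.index? arr.reverse 2).getD 0 : Nat)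
    PySem.List.slice arr (some (first : Int)) (some (last + 1))

-- ===== PRECONDITION & SPEC =====
def Spec_solution (arr : List Int) (out : List Int) : Prop := out = solution_alt arr
instance (arr : List Int) (out : List Int) : Decidable (Spec_solution arr out) := by unfold Spec_solution; infer_instance

-- ===== CLAIM (what is proved, stated in full; the proofs are below) =====
def Claim_equal_solution : Prop := ∀ (arr : List Int), Dom_solution arr → Spec_solution arr (solution arr)

-- ===== LEMMAS AND PROOFS =====

/-- The positions A's loop collects, as a `Nat` index list. -/
def idxs (arr : List Int) : List Nat :=
  (List.range arr.length).filter (fun k => decide (arr.getD k 0 = 2))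

lemma temp_eq (arr : List Int) :
    (PySem.List.pyRange 0 (arr.length : Int) 1).foldl
      (fun t i => if PySem.List.pyGetD arr i 0 = 2 then t ++ [i] else t) []
      = List.map (fun (k : Nat) => (k : Int)) (idxs arr) := by
  rw [PySem.List.foldl_append_ite_eq_filter, PySem.List.pyRange_zero_natCast, List.filter_map]
  simp [idxs, Function.comp_def, PySem.List.pyGetD_natCast]

lemma mem_idxs (arr : List Int) (k : Nat) :
    k ∈ idxs arr ↔ ∃ h : k < arr.length, arr[k] = 2 := by
  simp only [idxs, List.mem_filter, List.mem_range, decide_eq_true_eq]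
  constructor
  · rintro ⟨hk, h2⟩
    exact ⟨hk, by rwa [List.getD_eq_getElem _ _ hk] at h2⟩
  · rintro ⟨hk, h2⟩
    exact ⟨hk, by rwa [List.getD_eq_getElem _ _ hk]⟩

lemma idxs_pairwise (arr : List Int) : (idxs arr).Pairwise (· < ·) :=
  List.Pairwise.filter _ (List.pairwise_lt_range)

lemma head_le_of_pairwise {l : List Nat} (hp : l.Pairwise (· < ·)) (hne : l ≠ [])
    {x : Nat} (hx : x ∈ l) : l.head hne ≤ x := by
  cases l with
  | nil => exact absurd rfl hne
  | cons a t =>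
    rcases List.mem_cons.mp hx with rfl | hx'
    · exact le_refl _
    · exact le_of_lt ((List.pairwise_cons.mp hp).1 x hx')

lemma le_getLast_of_pairwise {l : List Nat} (hp : l.Pairwise (· < ·)) (hne : l ≠ [])
    {x : Nat} (hx : x ∈ l) : x ≤ l.getLast hne := by
  induction l with
  | nil => exact absurd rfl hne
  | cons a t ih =>
    cases t with
    | nil =>
      simp only [List.mem_singleton] at hx
      subst hx; simp
    | cons b u =>
      rw [List.getLast_cons (by simp)]
      rcases List.mem_cons.mp hx with rfl | hx'
      · exact le_of_lt ((List.pairwise_cons.mp hp).1 _ (List.getLast_mem (by simp)))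
      · exact ih (List.pairwise_cons.mp hp).2 (by simp) hx'

-- ===== VERDICT (by name: the statement is the Claim_ definition above) =====
theorem solution_spec : Claim_equal_solution := by
  intro arr _
  unfold Spec_solution
  by_cases h2 : (2 : Int) ∈ arr
  · -- 2 occurs in arr
    obtain ⟨f, hf⟩ : ∃ f, PySem.List.index? arr 2 = some f :=
      Option.isSome_iff_exists.mp ((PySem.List.index?_isSome_iff arr 2).mpr h2)
    obtain ⟨hfn, hf2, hfmin⟩ := PySem.List.getElem_of_index?_eq_some hf
    have h2r : (2 : Int) ∈ arr.reverse := List.mem_reverse.mpr h2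
    obtain ⟨r, hr⟩ : ∃ r, PySem.List.index? arr.reverse 2 = some r :=
      Option.isSome_iff_exists.mp ((PySem.List.index?_isSome_iff arr.reverse 2).mpr h2r)
    obtain ⟨hrn, hr2, hrmin⟩ := PySem.List.getElem_of_index?_eq_some hr
    have hrn' : r < arr.length := by simpa using hrn
    rw [List.getElem_reverse] at hr2
    have hmemf : f ∈ idxs arr := (mem_idxs arr f).mpr ⟨hfn, hf2⟩
    have hmeml : arr.length - 1 - r ∈ idxs arr :=
      (mem_idxs arr _).mpr ⟨by omega, by simpa using hr2⟩
    have hne : idxs arr ≠ [] := by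
      intro h; rw [h] at hmemf; exact absurd hmemf (List.not_mem_nil)
    have hp := idxs_pairwise arr
    have hhead : (idxs arr).head hne = f := by
      apply le_antisymm (head_le_of_pairwise hp hne hmemf)
      have hm := List.head_mem hne
      obtain ⟨hlt, hv⟩ := (mem_idxs arr _).mp hm
      by_contra hlt'
      exact hfmin _ (by omega) hv
    have hlast : (idxs arr).getLast hne = arr.length - 1 - r := by
      apply le_antisymm _ (le_getLast_of_pairwise hp hne hmeml)
      have hm := List.getLast_mem hne
      obtain ⟨hlt, hv⟩ := (mem_idxs arr _).mp hm
      have hrev : arr.reverse[arr.length - 1 - (idxs arr).getLast hne]'(by simp; omega) = 2 := by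
        rw [List.getElem_reverse]
        have : arr.length - 1 - (arr.length - 1 - (idxs arr).getLast hne) = (idxs arr).getLast hne := by
          omega
        simp only [this]
        exact hv
      have : ¬ (arr.length - 1 - (idxs arr).getLast hne < r) := fun hlt2 => hrmin _ hlt2 hrev
      omega
    -- the B side
    have hB : solution_alt arr =
        PySem.List.slice arr (some (f : Int)) (some ((arr.length : Int) - 1 - (r : Int) + 1)) := by
      rw [solution_alt, if_neg (not_not_intro h2)]
      simp only [hf, hr, Option.getD_some]
    -- the A side
    rw [hB, solution]
    simp only [temp_eq arr]
    set T := List.map (fun (k : Nat) => (k : Int)) (idxs arr) with hT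
    obtain ⟨a, t, hat⟩ := List.exists_cons_of_ne_nil hne
    have ha : a = f := by
      have h1 : (idxs arr).head? = some a := by rw [hat]; rfl
      have h2' : (idxs arr).head? = some ((idxs arr).head hne) := List.head?_eq_some_head hne
      rw [hhead, h1] at h2'
      exact Option.some.inj h2'
    have hsplit : idxs arr = (idxs arr).dropLast ++ [arr.length - 1 - r] := by
      have h := (List.dropLast_append_getLast hne).symm
      rw [hlast] at h
      exact h
    have hlenT : T.length = (idxs arr).length := by rw [hT]; simp
    have e0 : PySem.List.pyGetD T 0 0 = (f : Int) := by
      rw [hT, hat, ha]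
      simp [PySem.List.pyGetD_zero_cons]
    have e1 : PySem.List.pyGetD T (-1) 0 = ((arr.length - 1 - r : Nat) : Int) := by
      rw [hT]
      conv_lhs => rw [hsplit]
      rw [List.map_append]
      simp [PySem.List.pyGetD_neg_one_append_singleton]
    by_cases hlen2 : 2 ≤ (idxs arr).length
    · rw [if_pos (by rw [hlenT]; exact hlen2), e0, e1]
      have hc : ((arr.length - 1 - r : Nat) : Int) + 1 = (arr.length : Int) - 1 - (r : Int) + 1 := by
        omega
      rw [hc]
    · rw [if_neg (by rw [hlenT]; exact hlen2)]
      have ht : t = [] := by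
        rcases t with _ | ⟨b, u⟩
        · rfl
        · exfalso; rw [hat] at hlen2; simp at hlen2
      rw [if_pos (by rw [hlenT, hat, ht]; rfl)]
      rw [hat, ht] at hmemf hmeml
      simp only [List.mem_singleton] at hmemf hmeml
      have hfl : f = arr.length - 1 - r := by omega
      have hcast : ((arr.length : Int) - 1 - (r : Int) + 1) = ((f + 1 : Nat) : Int) := by
        omega
      rw [hcast, PySem.List.slice_natCast, List.drop_eq_getElem_cons hfn, hf2]
      simp
  · -- 2 does not occur: both return [-1]
    have hidx : idxs arr = [] := by
      rw [List.eq_nil_iff_forall_not_mem]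
      intro k hk
      obtain ⟨hlt, hv⟩ := (mem_idxs arr k).mp hk
      exact h2 (hv ▸ List.getElem_mem hlt)
    rw [solution, solution_alt, if_pos h2]
    simp [temp_eq arr, hidx]
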